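-- pv_equiv track=rewrite | github.com/JiyoungMa/Algorithm | Programmers/시험장 나누기(진행중).py | sliceGraph
-- ===== SOURCE A (Python) =====
-- import heapq
--
-- def sliceGraph(k, arrayDict):
--     heap = []
--     heapq.heappush(heap,[-arrayDict[1],1])
--     cut = 0
--
--     while heap:
--         nowValue, nowIndex = heapq.heappop(heap)
--         nowValue = -nowValue
--         if nowIndex != 1:
--             nextIndex = nowIndex//2
--             while nextIndex > 0:
--                 arrayDict[nextIndex] = arrayDict[nextIndex] - nowValue
--                 nextIndex = nextIndex//2
--         if (nowIndex*2 not in arrayDict and nowIndex*2+1 not in arrayDict):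
--             continue
--
--         cut += 1
--
--         if nowIndex*2 in arrayDict:
--             heapq.heappush(heap,(-arrayDict[nowIndex*2], nowIndex*2))
--         if nowIndex*2+1 in arrayDict:
--             heapq.heappush(heap,(-arrayDict[nowIndex*2+1], nowIndex*2+1))
--
--         if cut == k:
--             break
--
--     return max(list(arrayDict.values()))
-- ===== SOURCE B (Python) =====
-- def sliceGraph(k, arrayDict):
--     # pending partition roots as (value-at-insertion, index) pairs, scanned for
--     # the best entry instead of kept in a heap
--     active = [(arrayDict[1], 1)]
--     cut = 0
--     while active:
--         best = min(active, key=lambda p: (-p[0], p[1]))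
--         active.remove(best)
--         value, index = best
--         a = index // 2
--         while a > 0:
--             arrayDict[a] -= value
--             a //= 2
--         children = [c for c in (index * 2, index * 2 + 1) if c in arrayDict]
--         if children:
--             cut += 1
--             active += [(arrayDict[c], c) for c in children]
--             if cut == k:
--                 break
--     return max(arrayDict.values())
-- ===== Notes on version B (the rewrite author's own statement) =====
-- stated objective: alternative
-- what changed: Replaces the heapq binary heap of [-value, index] entries by a plain list of pending (value, index) pairs selected with min(active, key=lambda p: (-p[0], p[1])) and removed by value, and drops the special-case index!=1 guard around the ancestor-subtraction walk (it starts at index//2, which is empty for the root).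
import Mathlib
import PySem

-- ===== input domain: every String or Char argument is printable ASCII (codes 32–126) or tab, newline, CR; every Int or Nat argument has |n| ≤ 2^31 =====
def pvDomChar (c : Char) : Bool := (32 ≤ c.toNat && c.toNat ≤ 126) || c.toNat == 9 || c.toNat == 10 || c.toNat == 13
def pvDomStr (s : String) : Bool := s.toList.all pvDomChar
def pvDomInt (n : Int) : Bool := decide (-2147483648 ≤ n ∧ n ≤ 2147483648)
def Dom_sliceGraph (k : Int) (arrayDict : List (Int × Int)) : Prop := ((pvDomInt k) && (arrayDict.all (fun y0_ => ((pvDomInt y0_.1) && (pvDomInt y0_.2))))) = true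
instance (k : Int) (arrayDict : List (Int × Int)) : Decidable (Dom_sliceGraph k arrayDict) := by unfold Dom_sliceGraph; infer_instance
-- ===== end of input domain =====

-- B replaces A's heapq heap of [-value, index] entries by a plain pending list
-- scanned with min(key=(-value, index)) (objective: alternative data structure,
-- same results).  Both A and B mutate the Python dict `arrayDict` in place in
-- the same way; the equivalence proved here is about the RETURN value.

-- ===== PORT A =====

-- Python's lexicographic `<` on the heap's (Int, Int) entries.
def pvLt (a b : Int × Int) : Bool := a.1 < b.1 || (a.1 == b.1 && a.2 < b.2)

-- heapq.heappush / heapq.heappop are ported as a sorted priority queue: the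
-- heap is kept sorted by Python's `<` on its entries, push inserts in order,
-- pop takes the head.  This is exact for every popped value: heappop returns
-- the lexicographic minimum of the heap's current contents, which is the head
-- of the sorted list (all entries have distinct second components here, and
-- equal entries are interchangeable values anyway).
def heapPush : List (Int × Int) → (Int × Int) → List (Int × Int)
  | [], x => [x]
  | h :: t, x => if pvLt x h then x :: h :: t else h :: heapPush t x

-- the inner `while nextIndex > 0: arrayDict[nextIndex] -= nowValue; nextIndex //= 2`.
-- `modify` with default 0 is exact here: Python would raise KeyError on a missing
-- ancestor key, but every index this loop visits is a key of the dict on every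
-- run admitted by Pre_ (ancestor chains of popped nodes consist of dict keys).
def subAncA (d : PySem.Dict Int Int) (next v : Int) : PySem.Dict Int Int :=
  if _h : 0 < next then
    subAncA (d.modify next 0 (· - v)) (PySem.Int.floordiv next 2) v
  else d
termination_by next.toNat
decreasing_by
  rw [PySem.Int.floordiv_eq_ediv_of_pos (by norm_num : (0:Int) < 2)]; omega

-- the `while heap:` loop; fuel (arrayDict.length + 1) is an upper bound on the
-- number of iterations (each dict key is pushed at most once).
def sliceLoopA : Nat → List (Int × Int) → PySem.Dict Int Int → Int → Int → PySem.Dict Int Int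
  | 0, _, d, _, _ => d
  | _ + 1, [], d, _, _ => d
  | fuel + 1, (nv, idx) :: rest, d, cut, k =>
    let nowValue := -nv
    let d1 := if idx ≠ 1 then subAncA d (PySem.Int.floordiv idx 2) nowValue else d
    if !d1.contains (idx * 2) && !d1.contains (idx * 2 + 1) then
      sliceLoopA fuel rest d1 cut k
    else
      let cut1 := cut + 1
      let h1 := if d1.contains (idx * 2) then heapPush rest (-(d1.getD (idx * 2) 0), idx * 2) else rest
      let h2 := if d1.contains (idx * 2 + 1) then heapPush h1 (-(d1.getD (idx * 2 + 1) 0), idx * 2 + 1) else h1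
      if cut1 == k then d1 else sliceLoopA fuel h2 d1 cut1 k

def sliceGraph (k : Int) (arrayDict : List (Int × Int)) : Int :=
  let d := PySem.Dict.mk arrayDict
  -- arrayDict[1]: getD is exact under Pre_ (key 1 present)
  let heap := heapPush [] (-(d.getD 1 0), 1)
  let dOut := sliceLoopA (arrayDict.length + 1) heap d 0 k
  -- max(list(arrayDict.values())): raises on an empty dict, excluded by Pre_
  match PySem.List.max? dOut.values (fun v => v) with
  | some m => m
  | none => 0

-- ===== PORT B =====

-- `a = index // 2; while a > 0: arrayDict[a] -= value; a //= 2` (same KeyError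
-- remark as for subAncA: exact under Pre_).
def subAncB (d : PySem.Dict Int Int) (a v : Int) : PySem.Dict Int Int :=
  if _h : 0 < a then
    subAncB (d.modify a 0 (· - v)) (PySem.Int.floordiv a 2) v
  else d
termination_by a.toNat
decreasing_by
  rw [PySem.Int.floordiv_eq_ediv_of_pos (by norm_num : (0:Int) < 2)]; omega

-- the `while active:` loop; min(active, key=lambda p: (-p[0], p[1])) is
-- PySem.List.min2?, which is some on the nonempty list (getD p); active.remove(best)
-- is PySem.List.remove?, which is some since best ∈ active (getD []).
def sliceLoopB : Nat → List (Int × Int) → PySem.Dict Int Int → Int → Int → PySem.Dict Int Int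
  | 0, _, d, _, _ => d
  | _ + 1, [], d, _, _ => d
  | fuel + 1, p :: t, d, cut, k =>
    let best := (PySem.List.min2? (p :: t) (fun q => -q.1) (fun q => q.2)).getD p
    let active1 := (PySem.List.remove? (p :: t) best).getD []
    let d1 := subAncB d (PySem.Int.floordiv best.2 2) best.1
    let children := [best.2 * 2, best.2 * 2 + 1].filter (fun c => d1.contains c)
    if children.isEmpty then
      sliceLoopB fuel active1 d1 cut k
    else
      let cut1 := cut + 1
      let active2 := active1 ++ children.map (fun c => (d1.getD c 0, c))
      if cut1 == k then d1 else sliceLoopB fuel active2 d1 cut1 k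

def sliceGraph_alt (k : Int) (arrayDict : List (Int × Int)) : Int :=
  let d := PySem.Dict.mk arrayDict
  let dOut := sliceLoopB (arrayDict.length + 1) [(d.getD 1 0, 1)] d 0 k
  match PySem.List.max? dOut.values (fun v => v) with
  | some m => m
  | none => 0

-- ===== PRECONDITION & SPEC =====

-- Pre_ excludes dicts without key 1, on which the Python A raises KeyError at
-- `arrayDict[1]` (B raises there too).
def Pre_sliceGraph (k : Int) (arrayDict : List (Int × Int)) : Prop :=
  (PySem.Dict.mk arrayDict).contains 1 = true
instance (k : Int) (arrayDict : List (Int × Int)) : Decidable (Pre_sliceGraph k arrayDict) := by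
  unfold Pre_sliceGraph; infer_instance

def pvWitness_sliceGraph : Int × (List (Int × Int)) := (2, [(1, 10), (2, 4), (3, 6)])

def Spec_sliceGraph (k : Int) (arrayDict : List (Int × Int)) (out : Int) : Prop := out = sliceGraph_alt k arrayDict
instance (k : Int) (arrayDict : List (Int × Int)) (out : Int) : Decidable (Spec_sliceGraph k arrayDict out) := by unfold Spec_sliceGraph; infer_instance

-- ===== CLAIM (what is proved, stated in full; the proofs are below) =====
def Claim_equal_sliceGraph : Prop := ∀ (k : Int) (arrayDict : List (Int × Int)), Dom_sliceGraph k arrayDict → Pre_sliceGraph k arrayDict → Spec_sliceGraph k arrayDict (sliceGraph k arrayDict)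

-- ===== LEMMAS AND PROOFS =====

-- B's pending entry (value, index) corresponds to A's heap entry (-value, index).
def pvF (p : Int × Int) : Int × Int := (-p.1, p.2)

theorem pvLt_iff (a b : Int × Int) : pvLt a b = true ↔ a.1 < b.1 ∨ (a.1 = b.1 ∧ a.2 < b.2) := by
  simp [pvLt]

theorem pvLt_irrefl (a : Int × Int) : pvLt a a = false := by
  simp [pvLt]

theorem pvLt_trans {a b c : Int × Int} (h1 : pvLt a b = true) (h2 : pvLt b c = true) :
    pvLt a c = true := by
  rw [pvLt_iff] at *; omega

theorem pvLt_antisymm {a b : Int × Int} (h1 : pvLt a b = false) (h2 : pvLt b a = false) :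
    a = b := by
  have h1' := h1; have h2' := h2
  rw [← Bool.not_eq_true, pvLt_iff] at h1' h2'
  have : a.1 = b.1 ∧ a.2 = b.2 := by omega
  exact Prod.ext this.1 this.2

theorem pvLt_total {a b : Int × Int} (h : pvLt a b = false) : pvLt b a = true ∨ a = b := by
  by_cases hb : pvLt b a = true
  · exact Or.inl hb
  · exact Or.inr (pvLt_antisymm h (by simpa using hb))

theorem pvF_inj : Function.Injective pvF := by
  intro a b h
  simp only [pvF, Prod.mk.injEq] at h
  exact Prod.ext (by omega) h.2

theorem heapPush_perm (l : List (Int × Int)) (x : Int × Int) :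
    (heapPush l x).Perm (x :: l) := by
  induction l with
  | nil => simp [heapPush]
  | cons h t ih =>
    simp only [heapPush]
    split
    · exact List.Perm.refl _
    · exact (ih.cons h).trans (List.Perm.swap x h t)

theorem mem_heapPush {l : List (Int × Int)} {x y : Int × Int} :
    y ∈ heapPush l x ↔ y = x ∨ y ∈ l := by
  rw [(heapPush_perm l x).mem_iff]; simp

theorem heapPush_sorted {l : List (Int × Int)} (x : Int × Int)
    (hs : l.Pairwise (fun a b => pvLt b a = false)) :
    (heapPush l x).Pairwise (fun a b => pvLt b a = false) := by
  induction l with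
  | nil => simp [heapPush]
  | cons h t ih =>
    rcases List.pairwise_cons.mp hs with ⟨hh, ht⟩
    simp only [heapPush]
    split
    · rename_i hx
      refine List.pairwise_cons.mpr ⟨?_, hs⟩
      intro y hy
      rcases hy with hy | hy
      · by_contra hc
        have hhx : pvLt h x = true := by simpa using hc
        have : pvLt x x = true := pvLt_trans hx hhx
        rw [pvLt_irrefl] at this; exact absurd this (by simp)
      · by_contra hc
        have hyx : pvLt y x = true := by simpa using hc
        have : pvLt y h = true := pvLt_trans hyx hx
        rw [hh y (by assumption)] at this; exact absurd this (by simp)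
    · rename_i hx
      refine List.pairwise_cons.mpr ⟨?_, ih ht⟩
      intro y hy
      rcases mem_heapPush.mp hy with rfl | hy
      · simpa using hx
      · exact hh y hy

theorem sorted_head_min {h : Int × Int} {t : List (Int × Int)}
    (hs : (h :: t).Pairwise (fun a b => pvLt b a = false)) :
    ∀ y ∈ h :: t, pvLt y h = false := by
  intro y hy
  rcases hy with _ | hy
  · exact pvLt_irrefl h
  · exact (List.pairwise_cons.mp hs).1 y (by assumption)

-- the foldl step of PySem.List.min2? with keys (-p.1) and (p.2) updates exactly
-- when the new element is pvLt-below (through pvF) the current minimum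
def pvStep (acc : Option (Int × Int)) (x : Int × Int) : Option (Int × Int) :=
  match acc with
  | none => some x
  | some m => if pvLt (pvF x) (pvF m) then some x else some m

theorem min2_step_cond (x m : Int × Int) :
    (decide (-x.1 < -m.1) || (!decide (-m.1 < -x.1) && decide (x.2 < m.2))) = pvLt (pvF x) (pvF m) := by
  simp only [pvLt, pvF]
  by_cases h1 : -x.1 < -m.1 <;> by_cases h2 : -m.1 < -x.1 <;>
    by_cases h3 : x.2 < m.2 <;> simp [h1, h2, h3] <;> omega

theorem min2?_eq_foldl (xs : List (Int × Int)) :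
    PySem.List.min2? xs (fun q => -q.1) (fun q => q.2) = xs.foldl pvStep none := by
  unfold PySem.List.min2?
  congr 1
  funext acc x
  cases acc with
  | none => rfl
  | some m =>
    show (if _ = true then some x else some m) = pvStep (some m) x
    simp only [pvStep]
    rw [min2_step_cond]

theorem min2_foldl_spec (t : List (Int × Int)) :
    ∀ m : Int × Int, ∃ m', t.foldl pvStep (some m) = some m' ∧
      (m' = m ∨ m' ∈ t) ∧ ∀ y, (y = m ∨ y ∈ t) → pvLt (pvF y) (pvF m') = false := by
  induction t with
  | nil =>
    intro m
    refine ⟨m, rfl, Or.inl rfl, ?_⟩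
    rintro y (rfl | hy)
    · exact pvLt_irrefl _
    · simp at hy
  | cons x t ih =>
    intro m
    simp only [List.foldl_cons]
    by_cases hc : pvLt (pvF x) (pvF m) = true
    · rcases ih x with ⟨m', hfold, hmem, hmin⟩
      refine ⟨m', ?_, ?_, ?_⟩
      · simpa [pvStep, hc] using hfold
      · rcases hmem with rfl | hm'
        · exact Or.inr List.mem_cons_self
        · exact Or.inr (List.mem_cons_of_mem _ hm')
      · rintro y (rfl | hy)
        · by_contra hcon
          have hmm' : pvLt (pvF y) (pvF m') = true := by simpa using hcon
          have hxm' := hmin x (Or.inl rfl)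
          have := pvLt_trans hc hmm'
          rw [hxm'] at this; exact absurd this (by simp)
        · rcases hy with _ | hy
          · exact hmin _ (Or.inl rfl)
          · exact hmin _ (Or.inr (by assumption))
    · rcases ih m with ⟨m', hfold, hmem, hmin⟩
      have hc' : pvLt (pvF x) (pvF m) = false := by simpa using hc
      refine ⟨m', ?_, ?_, ?_⟩
      · simpa [pvStep, hc'] using hfold
      · rcases hmem with rfl | hm'
        · exact Or.inl rfl
        · exact Or.inr (List.mem_cons_of_mem _ hm')
      · rintro y (rfl | hy)
        · exact hmin _ (Or.inl rfl)
        · rcases hy with _ | hy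
          · -- y = x
            by_contra hcon
            have hxm' : pvLt (pvF x) (pvF m') = true := by simpa using hcon
            have hmm' := hmin m (Or.inl rfl)
            rcases pvLt_total hc' with hlt | heq
            · have := pvLt_trans hlt hxm'
              rw [hmm'] at this; exact absurd this (by simp)
            · rw [heq] at hxm'; rw [hmm'] at hxm'; exact absurd hxm' (by simp)
          · exact hmin _ (Or.inr (by assumption))

theorem min2_spec (a : Int × Int) (t : List (Int × Int)) :
    ∃ m, PySem.List.min2? (a :: t) (fun q => -q.1) (fun q => q.2) = some m ∧
      m ∈ a :: t ∧ ∀ y ∈ a :: t, pvLt (pvF y) (pvF m) = false := by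
  rcases min2_foldl_spec t a with ⟨m', hfold, hmem, hmin⟩
  refine ⟨m', ?_, ?_, ?_⟩
  · rw [min2?_eq_foldl]
    simpa [pvStep] using hfold
  · rcases hmem with rfl | h
    · exact List.mem_cons_self
    · exact List.mem_cons_of_mem _ h
  · intro y hy
    rcases hy with _ | hy
    · exact hmin _ (Or.inl rfl)
    · exact hmin _ (Or.inr (by assumption))

theorem subAncB_eq (d : PySem.Dict Int Int) (a v : Int) : subAncB d a v = subAncA d a v := by
  rw [subAncB, subAncA]
  by_cases h : 0 < a
  · simp only [h, dif_pos]
    exact subAncB_eq _ _ _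
  · simp only [h, dif_neg, not_false_iff]
termination_by a.toNat
decreasing_by
  rw [PySem.Int.floordiv_eq_ediv_of_pos (by norm_num : (0:Int) < 2)]; omega

theorem subAncA_nonpos (d : PySem.Dict Int Int) {a : Int} (h : ¬ 0 < a) (v : Int) :
    subAncA d a v = d := by
  rw [subAncA]; simp [h]

-- the selected element: with the heap a sorted permutation of pvF·active, B's
-- scan minimum maps to the heap's head
theorem selection_eq {h : Int × Int} {rest : List (Int × Int)} {active : List (Int × Int)}
    {m : Int × Int}
    (hperm : (h :: rest).Perm (active.map pvF))
    (hsort : (h :: rest).Pairwise (fun a b => pvLt b a = false))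
    (hm : m ∈ active) (hmin : ∀ y ∈ active, pvLt (pvF y) (pvF m) = false) :
    pvF m = h := by
  have hmem : pvF m ∈ h :: rest := hperm.mem_iff.mpr (List.mem_map_of_mem hm)
  have h1 : pvLt (pvF m) h = false := sorted_head_min hsort _ hmem
  have hh : h ∈ active.map pvF := hperm.mem_iff.mp (List.mem_cons_self)
  rcases List.mem_map.mp hh with ⟨y, hy, rfl⟩
  exact pvLt_antisymm h1 (hmin y hy)

-- the main bisimulation: A's sorted heap is pvF applied to B's pending list, up
-- to permutation; all other state is shared
theorem loop_eq : ∀ (fuel : Nat) (heap active : List (Int × Int)) (d : PySem.Dict Int Int)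
    (cut k : Int), heap.Perm (active.map pvF) →
    heap.Pairwise (fun a b => pvLt b a = false) →
    sliceLoopA fuel heap d cut k = sliceLoopB fuel active d cut k := by
  intro fuel
  induction fuel with
  | zero => intro heap active d cut k _ _; rfl
  | succ fuel ih =>
    intro heap active d cut k hperm hsort
    match heap, active with
    | [], active =>
      have : active.map pvF = [] := hperm.symm.eq_nil
      have ha : active = [] := by simpa using this
      subst ha; rfl
    | (nv, idx) :: rest, [] => simp at hperm
    | (nv, idx) :: rest, p :: t =>
      rcases min2_spec p t with ⟨m, hmin2, hmem, hminimal⟩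
      have hfm : pvF m = (nv, idx) := selection_eq hperm hsort hmem hminimal
      have hval : m.1 = -nv ∧ m.2 = idx := by
        have := hfm
        simp only [pvF, Prod.mk.injEq] at this
        exact ⟨by omega, this.2⟩
      -- B's removal
      have hrem : (PySem.List.remove? (p :: t) m) = some ((p :: t).erase m) :=
        PySem.List.remove?_eq_some_erase _ m hmem
      -- tail relation
      have htail : rest.Perm (((p :: t).erase m).map pvF) := by
        have h2 : (((nv, idx) :: rest).erase (pvF m)).Perm (((p :: t).map pvF).erase (pvF m)) :=
          hperm.erase _
        have h3 : ((nv, idx) :: rest).erase (pvF m) = rest := by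
          rw [hfm]; simp [List.erase_cons_head]
        rw [h3] at h2
        rw [List.map_erase pvF_inj]
        exact h2
      have htsort : rest.Pairwise (fun a b => pvLt b a = false) :=
        (List.pairwise_cons.mp hsort).2
      -- dict after ancestor subtraction agrees
      have hd1 : (if idx ≠ 1 then subAncA d (PySem.Int.floordiv idx 2) (-nv) else d)
          = subAncB d (PySem.Int.floordiv m.2 2) m.1 := by
        rw [subAncB_eq, hval.1, hval.2]
        by_cases hidx : idx = 1
        · subst hidx
          simp only [ne_eq, not_true_eq_false, if_false]
          have : PySem.Int.floordiv 1 2 = 0 := by decide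
          rw [this, subAncA_nonpos d (by omega)]
        · simp [hidx]
      simp only [sliceLoopA, sliceLoopB, hmin2, Option.getD_some, hrem, ← hd1]
      set d1 := if idx ≠ 1 then subAncA d (PySem.Int.floordiv idx 2) (-nv) else d with hd1def
      rw [hval.2]
      -- case analysis on the two children
      cases hcl : d1.contains (idx * 2) <;> cases hcr : d1.contains (idx * 2 + 1) <;>
        simp only [hcl, hcr, List.filter_cons, List.filter_nil, Bool.not_true, Bool.not_false,
          Bool.and_false, Bool.and_true, Bool.and_self, if_true, if_false, List.isEmpty_cons,
          List.isEmpty_nil, List.map_cons, List.map_nil, Bool.false_eq_true]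
      · -- neither child: continue
        exact ih _ _ _ _ _ htail htsort
      · -- only the right child
        by_cases hk : (cut + 1 == k) = true
        · simp [hk]
        · simp only [hk]
          refine ih _ _ _ _ _ ?_ (heapPush_sorted _ htsort)
          refine (heapPush_perm _ _).trans ?_
          rw [List.map_append]
          refine (List.Perm.cons _ htail).trans ?_
          simpa [pvF] using (List.perm_append_singleton _ _).symm
      · -- only the left child
        by_cases hk : (cut + 1 == k) = true
        · simp [hk]
        · simp only [hk]
          refine ih _ _ _ _ _ ?_ (heapPush_sorted _ htsort)
          refine (heapPush_perm _ _).trans ?_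
          rw [List.map_append]
          refine (List.Perm.cons _ htail).trans ?_
          simpa [pvF] using (List.perm_append_singleton _ _).symm
      · -- both children
        by_cases hk : (cut + 1 == k) = true
        · simp [hk]
        · simp only [hk]
          refine ih _ _ _ _ _ ?_ (heapPush_sorted _ (heapPush_sorted _ htsort))
          refine (heapPush_perm _ _).trans ?_
          refine (List.Perm.cons _ (heapPush_perm _ _)).trans ?_
          refine (List.Perm.cons _ (List.Perm.cons _ htail)).trans ?_
          refine (List.Perm.swap _ _ _).trans ?_
          rw [List.map_append]
          exact List.perm_append_comm
            (l₁ := [(-d1.getD (idx * 2) 0, idx * 2), (-d1.getD (idx * 2 + 1) 0, idx * 2 + 1)])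
            (l₂ := List.map pvF ((p :: t).erase m))

-- ===== VERDICT (by name: the statement is the Claim_ definition above) =====
theorem sliceGraph_spec : Claim_equal_sliceGraph := by
  intro k arrayDict _ _
  unfold Spec_sliceGraph sliceGraph sliceGraph_alt
  have h := loop_eq (arrayDict.length + 1)
    (heapPush [] (-((PySem.Dict.mk arrayDict).getD 1 0), 1))
    [((PySem.Dict.mk arrayDict).getD 1 0, 1)]
    (PySem.Dict.mk arrayDict) 0 k ?_ ?_
  · simp only [h]
  · simp [heapPush, pvF]
  · simp [heapPush]
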